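-- pv_equiv track=rewrite | github.com/danielruiz368/Ejercicios-CSS | conquerblocks/python_ejercicios/red_social_5b_tuplas_set.py | obtener_estadisticas_amigos
-- ===== SOURCE A (Python) =====
-- def obtener_estadisticas_amigos(red_social):
--     estadisticas = []
--     usuario_mas_amigos = None
--     max_amigos = 0
--
--     for usuario, amigos in red_social:
--         num_amigos = len(set(amigos))
--         estadisticas.append((usuario, num_amigos))
--
--         if num_amigos > max_amigos:
--             max_amigos = num_amigos
--             usuario_mas_amigos = usuario
--
--     return tuple(estadisticas), (max_amigos, usuario_mas_amigos)
-- ===== SOURCE B (Python) =====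
-- def obtener_estadisticas_amigos(red_social):
--     estadisticas = [(usuario, len(set(amigos))) for usuario, amigos in red_social]
--     max_amigos = max((n for _, n in estadisticas), default=0)
--     if max_amigos > 0:
--         usuario_mas_amigos = next(u for u, n in estadisticas if n == max_amigos)
--     else:
--         usuario_mas_amigos = None
--     return tuple(estadisticas), (max_amigos, usuario_mas_amigos)
-- ===== Notes on version B (the rewrite author's own statement) =====
-- stated objective: simpler
-- what changed: Replaces the single loop with running strict-max state by a comprehension building the statistics, a separate max over the counts, and a separate first-match scan for the winner.
import Mathlib
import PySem

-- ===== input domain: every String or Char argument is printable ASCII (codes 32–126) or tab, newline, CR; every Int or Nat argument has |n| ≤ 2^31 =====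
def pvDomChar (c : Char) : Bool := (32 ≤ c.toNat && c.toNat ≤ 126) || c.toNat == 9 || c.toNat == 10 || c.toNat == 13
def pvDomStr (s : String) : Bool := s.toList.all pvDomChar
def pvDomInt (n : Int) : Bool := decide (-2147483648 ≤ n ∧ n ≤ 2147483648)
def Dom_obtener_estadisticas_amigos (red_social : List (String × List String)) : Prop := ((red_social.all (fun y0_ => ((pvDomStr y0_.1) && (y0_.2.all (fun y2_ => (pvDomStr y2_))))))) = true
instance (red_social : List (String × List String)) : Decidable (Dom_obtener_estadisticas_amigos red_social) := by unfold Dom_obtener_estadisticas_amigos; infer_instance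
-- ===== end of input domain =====

-- B builds the statistics list by a map, then computes the max count and the first user attaining it in separate passes (simpler decomposition; same cost).


-- ===== PORT A =====
-- loop state: (estadisticas, usuario_mas_amigos, max_amigos)
def obtener_estadisticas_amigos (red_social : List (String × List String)) : (List (String × Int)) × (Int × Option String) :=
  let st := red_social.foldl
    (fun (s : List (String × Int) × Option String × Int) p =>
      let num_amigos : Int := ((PySem.Set.ofList p.2).length : Nat)
      let est := s.1 ++ [(p.1, num_amigos)]
      if num_amigos > s.2.2 then (est, some p.1, num_amigos) else (est, s.2.1, s.2.2))
    ([], none, 0)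
  (st.1, st.2.2, st.2.1)

-- ===== PORT B =====
def obtener_estadisticas_amigos_alt (red_social : List (String × List String)) : (List (String × Int)) × (Int × Option String) :=
  let estadisticas : List (String × Int) :=
    red_social.map (fun p => (p.1, ((PySem.Set.ofList p.2).length : Nat)))
  let max_amigos : Int := estadisticas.foldl (fun m q => max m q.2) 0
  let usuario_mas_amigos : Option String :=
    if max_amigos > 0 then (estadisticas.find? (fun q => q.2 == max_amigos)).map Prod.fst
    else none
  (estadisticas, max_amigos, usuario_mas_amigos)

-- ===== PRECONDITION & SPEC =====
def Spec_obtener_estadisticas_amigos (red_social : List (String × List String)) (out : (List (String × Int)) × (Int × Option String)) : Prop := out = obtener_estadisticas_amigos_alt red_social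
instance (red_social : List (String × List String)) (out : (List (String × Int)) × (Int × Option String)) : Decidable (Spec_obtener_estadisticas_amigos red_social out) := by unfold Spec_obtener_estadisticas_amigos; infer_instance

-- ===== CLAIM (what is proved, stated in full; the proofs are below) =====
def Claim_equal_obtener_estadisticas_amigos : Prop := ∀ (red_social : List (String × List String)), Dom_obtener_estadisticas_amigos red_social → Spec_obtener_estadisticas_amigos red_social (obtener_estadisticas_amigos red_social)

-- ===== LEMMAS AND PROOFS =====

-- the count of one entry and the per-entry statistic
def pvCnt (a : List String) : Int := ((PySem.Set.ofList a).length : Nat)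

def pvStats (rs : List (String × List String)) : List (String × Int) :=
  rs.map (fun p => (p.1, pvCnt p.2))

-- A's loop body
def pvStep (s : List (String × Int) × Option String × Int) (p : String × List String) :
    List (String × Int) × Option String × Int :=
  let n := pvCnt p.2
  let est := s.1 ++ [(p.1, n)]
  if n > s.2.2 then (est, some p.1, n) else (est, s.2.1, s.2.2)

theorem foldl_max_le {l : List (String × Int)} {m : Int} :
    m ≤ l.foldl (fun m q => max m q.2) m := by
  induction l generalizing m with
  | nil => simp
  | cons q t ih => exact le_trans (le_max_left _ _) (by simpa using ih (m := max m q.2))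

-- invariant of A's fold: the final estadisticas, max and winner in terms of pvStats
theorem pvFold_char (rs : List (String × List String)) :
    ∀ (acc : List (String × Int)) (b : Option String) (m : Int),
    rs.foldl pvStep (acc, b, m) =
      (acc ++ pvStats rs,
       (let M := (pvStats rs).foldl (fun m q => max m q.2) m
        if M > m then ((pvStats rs).find? (fun q => q.2 == M)).map Prod.fst else b),
       (pvStats rs).foldl (fun m q => max m q.2) m) := by
  induction rs with
  | nil => intro acc b m; simp [pvStats]
  | cons p t ih =>
    intro acc b m
    have hstep : List.foldl pvStep (acc, b, m) (p :: t) =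
        List.foldl pvStep (pvStep (acc, b, m) p) t := rfl
    have hstats : pvStats (p :: t) = (p.1, pvCnt p.2) :: pvStats t := rfl
    by_cases hgt : pvCnt p.2 > m
    · -- step updates the winner to p.1 and the max to this count
      have h1 : pvStep (acc, b, m) p = (acc ++ [(p.1, pvCnt p.2)], some p.1, pvCnt p.2) := by
        simp [pvStep, hgt]
      have hmx : max m (pvCnt p.2) = pvCnt p.2 := max_eq_right hgt.le
      rw [hstep, h1, ih]
      have hfold : (pvStats (p :: t)).foldl (fun m q => max m q.2) m
          = (pvStats t).foldl (fun m q => max m q.2) (pvCnt p.2) := by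
        rw [hstats]; simp [hmx]
      have hfoldc : List.foldl (fun m q => max m q.2) m ((p.1, pvCnt p.2) :: pvStats t)
          = (pvStats t).foldl (fun m q => max m q.2) (pvCnt p.2) := by
        simp [hmx]
      set M := (pvStats t).foldl (fun m q => max m q.2) (pvCnt p.2) with hM
      have hnM : pvCnt p.2 ≤ M := foldl_max_le
      have hMm : M > m := lt_of_lt_of_le hgt hnM
      refine Prod.ext (by simp [hstats, List.append_assoc]) (Prod.ext ?_ ?_)
      · by_cases hMn : M > pvCnt p.2
        · have hne : (pvCnt p.2 == M) = false := by simp [Int.ne_of_lt hMn]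
          rw [hstats, hfoldc, if_pos hMm]
          simp [List.find?, hne]
          exact fun h => absurd h (not_le.mpr hMn)
        · have hMeq : M = pvCnt p.2 := le_antisymm (not_lt.mp hMn) hnM
          have hbe : (pvCnt p.2 == M) = true := by simp [hMeq]
          rw [hstats, hfoldc, if_pos hMm]
          simp [List.find?, hbe]
          exact fun h => absurd h hMn
      · simp only [hfold]
    · -- step keeps winner and max
      have h1 : pvStep (acc, b, m) p = (acc ++ [(p.1, pvCnt p.2)], b, m) := by
        simp [pvStep, hgt]
      have hmx : max m (pvCnt p.2) = m := max_eq_left (not_lt.mp hgt)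
      rw [hstep, h1, ih]
      have hfold : (pvStats (p :: t)).foldl (fun m q => max m q.2) m
          = (pvStats t).foldl (fun m q => max m q.2) m := by
        rw [hstats]; simp [hmx]
      have hfoldc : List.foldl (fun m q => max m q.2) m ((p.1, pvCnt p.2) :: pvStats t)
          = (pvStats t).foldl (fun m q => max m q.2) m := by
        simp [hmx]
      set M := (pvStats t).foldl (fun m q => max m q.2) m with hM
      refine Prod.ext (by simp [hstats, List.append_assoc]) (Prod.ext ?_ ?_)
      · by_cases hMm : M > m
        · have hnM : pvCnt p.2 < M := lt_of_le_of_lt (not_lt.mp hgt) hMm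
          have hne : (pvCnt p.2 == M) = false := by simp [Int.ne_of_lt hnM]
          rw [hstats, hfoldc, if_pos hMm]
          simp [List.find?, hne]
          exact fun h => absurd h (not_le.mpr hMm)
        · rw [hstats, hfoldc]
          simp [hMm]
      · simp only [hfold]

-- ===== VERDICT (by name: the statement is the Claim_ definition above) =====
theorem obtener_estadisticas_amigos_spec : Claim_equal_obtener_estadisticas_amigos := by
  unfold Claim_equal_obtener_estadisticas_amigos
  intro rs _
  unfold Spec_obtener_estadisticas_amigos
  have hfold : obtener_estadisticas_amigos rs
      = (let st := rs.foldl pvStep ([], none, 0); (st.1, st.2.2, st.2.1)) := rfl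
  rw [hfold, pvFold_char rs [] none 0]
  rfl
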